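-- pv_equiv track=rewrite | github.com/parvyyy/leetcode | daily/01/valid_parentheses_string.py | isValidCorrect
-- ===== SOURCE A (Python) =====
-- def isValidCorrect(s: str, locked: str):
--     if len(s) % 2 == 1:
--         return False
--
--     # Notice that if a parentheses is locked, it cannot be changed. Those
--     # that are not locked are able to be completely controlled!
--     s = list(s)
--     for (i, isLocked) in enumerate(locked):
--         if isLocked == '0':
--             s[i] = 'X'
--
--     # Now, we must ensure that for every ')', there is sufficient space on it's left
--     # to become '(', and similarly for every '(' there is sufficient space on it's right
--     # to become ')'. We achieve this using a 'prefix sum'.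
--     sum_open = sum_closed = sum_free = 0
--     for parentheses in s:
--         sum_open += parentheses == '('
--         sum_closed += parentheses == ')'
--         sum_free += parentheses == 'X'
--
--         if sum_closed > sum_open + sum_free:
--             return False
--
--     sum_open = sum_closed = sum_free = 0
--     for parentheses in reversed(s):
--         sum_open += parentheses == '('
--         sum_closed += parentheses == ')'
--         sum_free += parentheses == 'X'
--
--         if sum_open > sum_closed + sum_free:
--             return False
--
--     return True
-- ===== SOURCE B (Python) =====
-- def isValidCorrect(s: str, locked: str):
--     if len(s) % 2 == 1:
--         return False
--
--     # Same preprocessing as A: unlocked positions become wildcards 'X'.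
--     s = list(s)
--     for (i, isLocked) in enumerate(locked):
--         if isLocked == '0':
--             s[i] = 'X'
--
--     # One pass: low/high = min/max achievable open-bracket balance.
--     low = high = 0
--     for ch in s:
--         if ch == '(':
--             low += 1
--             high += 1
--         elif ch == ')':
--             low -= 1
--             high -= 1
--         elif ch == 'X':
--             low -= 1
--             high += 1
--         if high < 0:
--             return False
--         if low < 0:
--             low = 0
--     return low == 0
-- ===== Notes on version B (the rewrite author's own statement) =====
-- stated objective: idiomatic
-- what changed: A's two directional prefix-sum scans (forward closed-vs-open+free, then backward open-vs-closed+free over the reversed list) are replaced by the standard single low/high range pass that tracks the min and max achievable open count with clamping.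
import Mathlib
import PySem

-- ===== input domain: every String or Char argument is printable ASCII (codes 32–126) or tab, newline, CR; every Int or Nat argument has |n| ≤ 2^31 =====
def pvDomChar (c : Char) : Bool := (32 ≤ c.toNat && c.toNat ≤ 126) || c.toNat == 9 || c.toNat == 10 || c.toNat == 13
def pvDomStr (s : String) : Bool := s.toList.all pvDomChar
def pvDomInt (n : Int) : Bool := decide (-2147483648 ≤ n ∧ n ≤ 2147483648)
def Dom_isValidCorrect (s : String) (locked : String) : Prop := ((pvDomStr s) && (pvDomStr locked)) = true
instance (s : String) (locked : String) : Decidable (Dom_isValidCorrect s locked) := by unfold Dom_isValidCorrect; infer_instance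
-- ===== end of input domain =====

-- B replaces A's two directional prefix-sum scans by one low/high range pass (idiomatic one-pass solution).

-- ===== PORT A =====
-- the X-marking loop: for (i, isLocked) in enumerate(locked): if isLocked == '0': s[i] = 'X'
def pvMarkA (t : List Char) (locked : List Char) : List Char :=
  (PySem.List.enumerate locked 0).foldl
    (fun acc p => if p.2 == '0' then PySem.List.pySetD acc p.1 'X' else acc) t

-- first loop: forward scan, early `return False` when sum_closed > sum_open + sum_free
def pvScanFwd : List Char → Int → Int → Int → Bool
  | [], _, _, _ => true
  | p :: rest, o, c, f =>
      let o' := o + (if p == '(' then 1 else 0)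
      let c' := c + (if p == ')' then 1 else 0)
      let f' := f + (if p == 'X' then 1 else 0)
      if c' > o' + f' then false else pvScanFwd rest o' c' f'

-- second loop over reversed(s), early `return False` when sum_open > sum_closed + sum_free
def pvScanBwd : List Char → Int → Int → Int → Bool
  | [], _, _, _ => true
  | p :: rest, o, c, f =>
      let o' := o + (if p == '(' then 1 else 0)
      let c' := c + (if p == ')' then 1 else 0)
      let f' := f + (if p == 'X' then 1 else 0)
      if o' > c' + f' then false else pvScanBwd rest o' c' f'

def isValidCorrect (s : String) (locked : String) : Bool :=
  if PySem.Int.mod (PySem.Str.len s) 2 == 1 then false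
  else
    let t := pvMarkA s.toList locked.toList
    if pvScanFwd t 0 0 0 then pvScanBwd t.reverse 0 0 0 else false

-- ===== PORT B =====
-- same X-marking preprocessing as Source B's first loop
def pvMarkB (t : List Char) (locked : List Char) : List Char :=
  (PySem.List.enumerate locked 0).foldl
    (fun acc p => if p.2 == '0' then PySem.List.pySetD acc p.1 'X' else acc) t

-- single pass maintaining low/high, early `return False` when high < 0, clamp low at 0
def pvScanLH : List Char → Int → Int → Bool
  | [], low, _ => low == 0
  | ch :: rest, low, high =>
      let low' := if ch == '(' then low + 1 else if ch == ')' then low - 1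
                  else if ch == 'X' then low - 1 else low
      let high' := if ch == '(' then high + 1 else if ch == ')' then high - 1
                   else if ch == 'X' then high + 1 else high
      if high' < 0 then false
      else pvScanLH rest (if low' < 0 then 0 else low') high'

def isValidCorrect_alt (s : String) (locked : String) : Bool :=
  if PySem.Int.mod (PySem.Str.len s) 2 == 1 then false
  else
    let t := pvMarkB s.toList locked.toList
    pvScanLH t 0 0

-- ===== PRECONDITION & SPEC =====
-- Pre_ excludes exactly the inputs where A raises IndexError: an even-length s with some
-- position i ≥ len(s) holding a '0' in locked (the marking loop's s[i] = 'X' is out of range).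
def Pre_isValidCorrect (s : String) (locked : String) : Prop :=
  s.toList.length % 2 = 1 ∨
    ∀ p ∈ PySem.List.enumerate locked.toList 0, p.2 = '0' → p.1 < (s.toList.length : Int)
instance (s : String) (locked : String) : Decidable (Pre_isValidCorrect s locked) := by
  unfold Pre_isValidCorrect; infer_instance
def pvWitness_isValidCorrect : String × String := ("()", "10")

def Spec_isValidCorrect (s : String) (locked : String) (out : Bool) : Prop := out = isValidCorrect_alt s locked
instance (s : String) (locked : String) (out : Bool) : Decidable (Spec_isValidCorrect s locked out) := by unfold Spec_isValidCorrect; infer_instance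

-- ===== CLAIM (what is proved, stated in full; the proofs are below) =====
def Claim_equal_isValidCorrect : Prop := ∀ (s : String) (locked : String), Dom_isValidCorrect s locked → Pre_isValidCorrect s locked → Spec_isValidCorrect s locked (isValidCorrect s locked)

-- ===== LEMMAS AND PROOFS =====

-- delta of the "min possible open count": '(' = +1, ')' and 'X' = -1, other chars 0
def pvD (ch : Char) : Int := if ch == '(' then 1 else if ch == ')' then -1 else if ch == 'X' then -1 else 0
-- delta of the "max possible open count": '(' and 'X' = +1, ')' = -1, other chars 0
def pvU (ch : Char) : Int := if ch == '(' then 1 else if ch == ')' then -1 else if ch == 'X' then 1 else 0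

def pvSumD (l : List Char) : Int := (l.map pvD).sum

-- max over all suffixes of l of their pvD-sum (the empty suffix contributes 0)
def pvN : List Char → Int
  | [] => 0
  | x :: xs => max (pvSumD (x :: xs)) (pvN xs)

-- abstract "high never drops below 0" scan
def pvHPass : List Char → Int → Bool
  | [], _ => true
  | ch :: rest, h => if h + pvU ch < 0 then false else pvHPass rest (h + pvU ch)

-- abstract "running pvD-sum never exceeds 0" scan (A's backward test)
def pvDPass : List Char → Int → Bool
  | [], _ => true
  | ch :: rest, x => if x + pvD ch > 0 then false else pvDPass rest (x + pvD ch)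

-- clamped low fold
def pvG : List Char → Int → Int
  | [], a => a
  | ch :: rest, a => pvG rest (if a + pvD ch < 0 then 0 else a + pvD ch)

theorem pvScanFwd_eq (l : List Char) : ∀ o c f, pvScanFwd l o c f = pvHPass l (o + f - c) := by
  induction l with
  | nil => intro o c f; rfl
  | cons ch rest ih =>
      intro o c f
      simp only [pvScanFwd, pvHPass, pvU]
      by_cases h1 : ch = '(' <;> by_cases h2 : ch = ')' <;> by_cases h3 : ch = 'X' <;>
        simp [h1, h2, h3, ih] <;>
        (first | rfl | omega | (simp only [decide_eq_decide]; omega) | (congr 1 <;> (first | rfl | omega | (simp only [decide_eq_decide]; omega) | (congr 1 <;> (first | rfl | omega | (simp only [decide_eq_decide]; omega) | (congr 1 <;> (first | rfl | omega | (simp only [decide_eq_decide]; omega))))))))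

theorem pvScanBwd_eq (l : List Char) : ∀ o c f, pvScanBwd l o c f = pvDPass l (o - c - f) := by
  induction l with
  | nil => intro o c f; rfl
  | cons ch rest ih =>
      intro o c f
      simp only [pvScanBwd, pvDPass, pvD]
      by_cases h1 : ch = '(' <;> by_cases h2 : ch = ')' <;> by_cases h3 : ch = 'X' <;>
        simp [h1, h2, h3, ih] <;>
        (first | rfl | omega | (simp only [decide_eq_decide]; omega) | (congr 1 <;> (first | rfl | omega | (simp only [decide_eq_decide]; omega) | (congr 1 <;> (first | rfl | omega | (simp only [decide_eq_decide]; omega) | (congr 1 <;> (first | rfl | omega | (simp only [decide_eq_decide]; omega))))))))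

theorem pvScanLH_eq (l : List Char) : ∀ low high,
    pvScanLH l low high = (pvHPass l high && (pvG l low == 0)) := by
  induction l with
  | nil => intro low high; simp [pvScanLH, pvHPass, pvG]
  | cons ch rest ih =>
      intro low high
      simp only [pvScanLH, pvHPass, pvG, pvU, pvD]
      by_cases h1 : ch = '(' <;> by_cases h2 : ch = ')' <;> by_cases h3 : ch = 'X' <;>
        simp [h1, h2, h3, ih, Bool.and_assoc, sub_eq_add_neg] <;>
        (first | rfl | omega | (simp only [decide_eq_decide]; omega) | (congr 1 <;> (first | rfl | omega | (simp only [decide_eq_decide]; omega) | (congr 1 <;> (first | rfl | omega | (simp only [decide_eq_decide]; omega) | (congr 1 <;> (first | rfl | omega | (simp only [decide_eq_decide]; omega))))))))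

theorem pvN_nonneg (l : List Char) : 0 ≤ pvN l := by
  induction l with
  | nil => simp [pvN]
  | cons x xs ih => simp only [pvN]; omega

theorem pvN_ge_sum (l : List Char) : pvSumD l ≤ pvN l := by
  cases l with
  | nil => simp [pvN, pvSumD]
  | cons x xs => simp only [pvN]; omega

theorem pvG_eq (l : List Char) : ∀ a, 0 ≤ a → pvG l a = max (a + pvSumD l) (pvN l) := by
  induction l with
  | nil => intro a ha; simp [pvG, pvSumD, pvN]; omega
  | cons ch rest ih =>
      intro a ha
      have hsum : pvSumD (ch :: rest) = pvD ch + pvSumD rest := by simp [pvSumD]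
      have hN : pvN (ch :: rest) = max (pvSumD (ch :: rest)) (pvN rest) := rfl
      have hge := pvN_ge_sum rest
      simp only [pvG]
      split_ifs with h
      · rw [ih 0 le_rfl]; omega
      · rw [ih _ (by omega)]; omega

theorem pvDPass_append (a b : List Char) : ∀ x,
    pvDPass (a ++ b) x = (pvDPass a x && pvDPass b (x + pvSumD a)) := by
  induction a with
  | nil => intro x; simp [pvDPass, pvSumD]
  | cons ch rest ih =>
      intro x
      simp only [List.cons_append, pvDPass]
      split_ifs with h
      · simp
      · rw [ih]
        have : x + pvSumD (ch :: rest) = x + pvD ch + pvSumD rest := by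
          simp [pvSumD]; ring
        rw [this]

theorem pvSumD_reverse (l : List Char) : pvSumD l.reverse = pvSumD l := by
  simp [pvSumD]

theorem pvDPass_reverse (l : List Char) : pvDPass l.reverse 0 = decide (pvN l ≤ 0) := by
  induction l with
  | nil => simp [pvDPass, pvN]
  | cons ch rest ih =>
      have hrev : (ch :: rest).reverse = rest.reverse ++ [ch] := by simp
      rw [hrev, pvDPass_append, ih, pvSumD_reverse]
      have hsum : pvSumD (ch :: rest) = pvD ch + pvSumD rest := by simp [pvSumD]
      have hN : pvN (ch :: rest) = max (pvSumD (ch :: rest)) (pvN rest) := rfl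
      simp only [pvDPass]
      split_ifs with h
      · simp only [Bool.and_false]
        symm; simp only [decide_eq_false_iff_not]; omega
      · simp only [Bool.and_true]
        simp only [decide_eq_decide]
        omega

-- the core algorithmic fact: A's two scans equal B's single low/high scan
theorem pvScans_eq (t : List Char) :
    (if pvScanFwd t 0 0 0 then pvScanBwd t.reverse 0 0 0 else false) = pvScanLH t 0 0 := by
  rw [pvScanLH_eq t 0 0, pvScanFwd_eq, pvScanBwd_eq]
  have h1 : (0 : Int) + 0 - 0 = 0 := by norm_num
  have h2 : (0 : Int) - 0 - 0 = 0 := by norm_num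
  rw [h1, h2, pvDPass_reverse]
  have hg : pvG t 0 = pvN t := by
    rw [pvG_eq t 0 le_rfl]
    have := pvN_ge_sum t
    omega
  rw [hg]
  have hnn := pvN_nonneg t
  have hd : decide (pvN t ≤ 0) = (pvN t == 0) := by
    by_cases h : pvN t = 0
    · simp [h]
    · have h2 : ¬ pvN t ≤ 0 := by omega
      simp [h, h2]
  rw [hd]
  cases pvHPass t 0 <;> rfl

-- ===== VERDICT (by name: the statement is the Claim_ definition above) =====
theorem isValidCorrect_spec : Claim_equal_isValidCorrect := by
  intro s locked _ _
  unfold Spec_isValidCorrect isValidCorrect isValidCorrect_alt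
  cases hc : (PySem.Int.mod (PySem.Str.len s) 2 == 1)
  · simp only [Bool.false_eq_true, if_false]
    have hm : pvMarkA s.toList locked.toList = pvMarkB s.toList locked.toList := rfl
    rw [hm] at *
    rw [← pvScans_eq]
  · simp
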